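-- pv_equiv track=rewrite | github.com/rohansen856/Bitcoin-AI | eval_framework_aider/core/prompt_generator.py | _extract_code_heuristic
-- ===== SOURCE A (Python) =====
-- def _extract_code_heuristic(response: str) -> str:
--     """Extract code using heuristics when no code blocks found"""
--     lines = response.split('\n')
--     code_lines = []
--     in_code = False
--
--     # Common code indicators
--     code_indicators = [
--         'def ', 'class ', 'function ', 'const ', 'let ', 'var ',
--         '#include', 'import ', 'from ', 'public class', 'fn ',
--         'struct ', 'enum ', 'trait ', 'impl '
--     ]
--
--     for line in lines:
--         stripped = line.strip()
--
--         # Check if line looks like code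
--         if any(stripped.startswith(indicator) for indicator in code_indicators):
--             in_code = True
--         elif stripped.endswith(('{', '}', ';', ':')):
--             in_code = True
--         elif 'return ' in stripped:
--             in_code = True
--         elif '=' in stripped and not stripped.startswith('#'):
--             in_code = True
--
--         if in_code and stripped:
--             code_lines.append(line)
--         elif in_code and not stripped:
--             code_lines.append(line)  # Keep empty lines within code
--         elif not in_code and stripped.startswith(('>', 'Question:', 'Problem:')):
--             # Stop if we hit explanatory text
--             break
--
--     return '\n'.join(code_lines) if code_lines else response
-- ===== SOURCE B (Python) =====
-- _CODE_INDICATORS = [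
--     'def ', 'class ', 'function ', 'const ', 'let ', 'var ',
--     '#include', 'import ', 'from ', 'public class', 'fn ',
--     'struct ', 'enum ', 'trait ', 'impl '
-- ]
--
--
-- def _looks_like_code(stripped: str) -> bool:
--     return (any(stripped.startswith(ind) for ind in _CODE_INDICATORS)
--             or stripped.endswith(('{', '}', ';', ':'))
--             or 'return ' in stripped
--             or ('=' in stripped and not stripped.startswith('#')))
--
--
-- def _extract_code_heuristic(response: str) -> str:
--     lines = response.split('\n')
--     for i, line in enumerate(lines):
--         stripped = line.strip()
--         if _looks_like_code(stripped):
--             return '\n'.join(lines[i:])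
--         if stripped.startswith(('>', 'Question:', 'Problem:')):
--             return response
--     return response
-- ===== Notes on version B (the rewrite author's own statement) =====
-- stated objective: simpler
-- what changed: Replaces A's stateful accumulate-every-line loop (in_code flag plus growing code_lines list) with a single boundary search: a looks_like_code predicate, find the first triggering line, and return the joined suffix lines[i:] (or the whole response on a stop marker / no trigger).
import Mathlib
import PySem

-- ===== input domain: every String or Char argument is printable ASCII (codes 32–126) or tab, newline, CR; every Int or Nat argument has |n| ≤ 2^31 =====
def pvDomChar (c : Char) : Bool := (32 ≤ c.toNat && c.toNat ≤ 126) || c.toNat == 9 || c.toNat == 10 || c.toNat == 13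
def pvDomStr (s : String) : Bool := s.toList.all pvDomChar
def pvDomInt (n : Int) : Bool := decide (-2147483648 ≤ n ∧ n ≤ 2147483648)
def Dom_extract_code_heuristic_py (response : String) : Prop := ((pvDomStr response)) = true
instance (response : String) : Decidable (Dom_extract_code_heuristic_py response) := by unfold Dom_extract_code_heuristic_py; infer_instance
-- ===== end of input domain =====

-- B replaces A's stateful accumulating loop by a boundary search plus suffix join (objective: simpler).

-- shared constant data: the code_indicators list of the Python source
def code_indicators : List String :=
  ["def ", "class ", "function ", "const ", "let ", "var ",
   "#include", "import ", "from ", "public class", "fn ",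
   "struct ", "enum ", "trait ", "impl "]

-- ===== PORT A =====
-- A's in_code update: the four-way if/elif chain of the loop body
def aCode (stripped : String) (inCode : Bool) : Bool :=
  if code_indicators.any (fun ind => PySem.Str.startswith stripped ind) then true
  else if PySem.Str.endswith stripped "{" || PySem.Str.endswith stripped "}"
       || PySem.Str.endswith stripped ";" || PySem.Str.endswith stripped ":" then true
  else if PySem.Str.isIn "return " stripped then true
  else if PySem.Str.isIn "=" stripped && !PySem.Str.startswith stripped "#" then true
  else inCode

-- literal port of A's loop: state = (code_lines, in_code), break returns the accumulator
def aLoop : List String → List String → Bool → List String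
  | [], codeLines, _ => codeLines
  | line :: rest, codeLines, inCode =>
    let stripped := PySem.Str.strip line
    let inCode' := aCode stripped inCode
    if inCode' && stripped != "" then aLoop rest (codeLines ++ [line]) inCode'
    else if inCode' && stripped == "" then aLoop rest (codeLines ++ [line]) inCode'
    else if !inCode' && (PySem.Str.startswith stripped ">" || PySem.Str.startswith stripped "Question:"
                         || PySem.Str.startswith stripped "Problem:") then codeLines
    else aLoop rest codeLines inCode'

-- response.split('\n'): the separator is the nonempty literal "\n", so split? is always some and getD is exact
def extract_code_heuristic_py (response : String) : String :=
  let lines := (PySem.Str.split? response "\n").getD []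
  let codeLines := aLoop lines [] false
  if codeLines != [] then PySem.Str.join "\n" codeLines else response

-- ===== PORT B =====
def looksLikeCode (s : String) : Bool :=
  code_indicators.any (fun ind => PySem.Str.startswith s ind)
  || (PySem.Str.endswith s "{" || PySem.Str.endswith s "}"
      || PySem.Str.endswith s ";" || PySem.Str.endswith s ":")
  || PySem.Str.isIn "return " s
  || (PySem.Str.isIn "=" s && !PySem.Str.startswith s "#")

def isStopMarker (s : String) : Bool :=
  PySem.Str.startswith s ">" || PySem.Str.startswith s "Question:" || PySem.Str.startswith s "Problem:"

-- B's loop: return the suffix lines[i:] at the first code-looking line, none on a stop marker or at the end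
def bFind : List String → Option (List String)
  | [] => none
  | line :: rest =>
    let stripped := PySem.Str.strip line
    if looksLikeCode stripped then some (line :: rest)
    else if isStopMarker stripped then none
    else bFind rest

def extract_code_heuristic_py_alt (response : String) : String :=
  match bFind ((PySem.Str.split? response "\n").getD []) with
  | some tail => PySem.Str.join "\n" tail
  | none => response

-- ===== PRECONDITION & SPEC =====
def Spec_extract_code_heuristic_py (response : String) (out : String) : Prop := out = extract_code_heuristic_py_alt response
instance (response : String) (out : String) : Decidable (Spec_extract_code_heuristic_py response out) := by unfold Spec_extract_code_heuristic_py; infer_instance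

-- ===== CLAIM (what is proved, stated in full; the proofs are below) =====
def Claim_equal_extract_code_heuristic_py : Prop := ∀ (response : String), Dom_extract_code_heuristic_py response → Spec_extract_code_heuristic_py response (extract_code_heuristic_py response)

-- ===== LEMMAS AND PROOFS =====

-- A's if/elif chain computes exactly B's predicate, or-ed with the old flag
lemma aCode_eq (s : String) (b : Bool) : aCode s b = (looksLikeCode s || b) := by
  unfold aCode looksLikeCode
  split_ifs <;> simp_all

-- once in_code is set, A appends every remaining line
lemma aLoop_true (l : List String) : ∀ acc, aLoop l acc true = acc ++ l := by
  induction l with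
  | nil => intro acc; simp [aLoop]
  | cons line rest ih =>
    intro acc
    simp only [aLoop, aCode_eq, Bool.or_true]
    split_ifs <;> simp_all

-- before in_code, A's scan is B's boundary search
lemma aLoop_false (l : List String) : ∀ acc,
    aLoop l acc false = acc ++ (match bFind l with | some t => t | none => []) := by
  induction l with
  | nil => intro acc; simp [aLoop, bFind]
  | cons line rest ih =>
    intro acc
    simp only [aLoop, aCode_eq, Bool.or_false, bFind]
    cases hc : looksLikeCode (PySem.Str.strip line) with
    | true =>
      simp only [Bool.true_and, if_true]
      by_cases he : PySem.Str.strip line = "" <;>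
        simp [he, aLoop_true]
    | false =>
      have hrw : (PySem.Str.startswith (PySem.Str.strip line) ">"
          || PySem.Str.startswith (PySem.Str.strip line) "Question:"
          || PySem.Str.startswith (PySem.Str.strip line) "Problem:") = isStopMarker (PySem.Str.strip line) := rfl
      simp only [Bool.false_and, Bool.not_false, Bool.true_and, hrw]
      cases hs : isStopMarker (PySem.Str.strip line) <;> simp [ih]

lemma bFind_some_ne_nil (l : List String) : ∀ t, bFind l = some t → t ≠ [] := by
  induction l with
  | nil => intro t h; simp [bFind] at h
  | cons line rest ih =>
    intro t h
    simp only [bFind] at h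
    split_ifs at h with h1 h2
    · cases h; simp
    · exact ih t h

-- ===== VERDICT (by name: the statement is the Claim_ definition above) =====
theorem extract_code_heuristic_py_spec : Claim_equal_extract_code_heuristic_py := by
  intro response _
  unfold Spec_extract_code_heuristic_py extract_code_heuristic_py extract_code_heuristic_py_alt
  simp only [aLoop_false, List.nil_append]
  cases h : bFind ((PySem.Str.split? response "\n").getD []) with
  | none => simp
  | some t => simp [bFind_some_ne_nil _ _ h]
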